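-- pv_equiv track=rewrite | github.com/SimplyPrint/slicer-profiles-db | slicer_profiles_db/index.py | resolve_generic_id
-- ===== SOURCE A (Python) =====
-- def resolve_generic_id(
--     generics: list[tuple[str, str, str]],
--     filament_type: str,
--     filament_name: str,
-- ) -> str | None:
--     """Find the best-matching generic profile ID for a filament.
--
--     ``generics`` is sorted longest-name-first so "generic pla silk" is tried
--     before "generic pla".  We check that the filament_type matches, then see
--     whether the sub-type keywords from the generic name appear in the filament
--     name (e.g. "Silk" from "Generic PLA Silk" found in "Bambu PLA Silk").
--     Falls back to the plain "Generic {MATERIAL}" entry.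
--     """
--     ft_upper = filament_type.upper()
--     name_lower = filament_name.lower()
--     base_fallback: str | None = None
--
--     for gen_name, gen_ft, gen_fid in generics:
--         if gen_ft != ft_upper:
--             continue
--         prefix = f"generic {gen_ft.lower()}"
--         suffix = gen_name[len(prefix):].strip() if gen_name.startswith(prefix) else ""
--         if suffix:
--             if suffix in name_lower:
--                 return gen_fid
--         else:
--             base_fallback = gen_fid
--
--     return base_fallback
-- ===== SOURCE B (Python) =====
-- def _suffix_of(gen_name, prefix):
--     """Sub-type keywords after the 'generic <material>' prefix, or '' if absent."""
--     return gen_name[len(prefix):].strip() if gen_name.startswith(prefix) else ""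
--
--
-- def resolve_generic_id(generics, filament_type, filament_name):
--     ft_upper = filament_type.upper()
--     name_lower = filament_name.lower()
--     prefix = f"generic {ft_upper.lower()}"
--     matching = [(gen_name, gen_fid) for gen_name, gen_ft, gen_fid in generics
--                 if gen_ft == ft_upper]
--     # Phase 1: first entry whose non-empty sub-type keywords occur in the name.
--     for gen_name, gen_fid in matching:
--         suffix = _suffix_of(gen_name, prefix)
--         if suffix and suffix in name_lower:
--             return gen_fid
--     # Phase 2: fall back to the last plain (empty-suffix) matching entry.
--     for gen_name, gen_fid in reversed(matching):
--         if not _suffix_of(gen_name, prefix):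
--             return gen_fid
--     return None
-- ===== Notes on version B (the rewrite author's own statement) =====
-- stated objective: alternative
-- what changed: Replaces A's single pass with a mutable fallback accumulator by a two-phase decomposition: filter the type-matching entries once, compute the prefix once, find the first non-empty-suffix hit, and only then scan the matching entries in reverse for the last plain fallback entry.
import Mathlib
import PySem

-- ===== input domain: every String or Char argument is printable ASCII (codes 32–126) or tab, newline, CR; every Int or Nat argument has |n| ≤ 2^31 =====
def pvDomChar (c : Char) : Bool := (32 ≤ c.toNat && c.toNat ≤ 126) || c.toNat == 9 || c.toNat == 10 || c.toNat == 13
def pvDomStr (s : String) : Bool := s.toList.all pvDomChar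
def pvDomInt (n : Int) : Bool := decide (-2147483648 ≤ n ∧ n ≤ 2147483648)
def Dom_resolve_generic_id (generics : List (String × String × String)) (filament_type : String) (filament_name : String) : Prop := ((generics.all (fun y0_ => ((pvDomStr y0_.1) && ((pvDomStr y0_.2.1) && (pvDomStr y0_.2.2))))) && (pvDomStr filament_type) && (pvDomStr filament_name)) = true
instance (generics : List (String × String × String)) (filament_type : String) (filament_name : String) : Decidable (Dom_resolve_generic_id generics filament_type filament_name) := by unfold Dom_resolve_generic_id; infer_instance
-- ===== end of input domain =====

-- B re-implements A as a two-phase decomposition (filter matching entries, first non-empty-suffix hit, else last plain fallback) instead of A's single pass with a fallback accumulator; same cost, equivalence proved.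


-- ===== PORT A =====
-- A's single loop, carrying the base_fallback accumulator.
def pvALoop (ft_upper name_lower : String) : List (String × String × String) → Option String → Option String
  | [], fb => fb
  | (gen_name, gen_ft, gen_fid) :: rest, fb =>
    if gen_ft ≠ ft_upper then pvALoop ft_upper name_lower rest fb
    else
      let pre := "generic " ++ PySem.Str.lower gen_ft
      let suffix := if PySem.Str.startswith gen_name pre
        then PySem.Str.strip (PySem.Str.slice gen_name (some (PySem.Str.len pre)) none)
        else ""
      if suffix ≠ "" then
        if PySem.Str.isIn suffix name_lower then some gen_fid
        else pvALoop ft_upper name_lower rest fb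
      else pvALoop ft_upper name_lower rest (some gen_fid)

def resolve_generic_id (generics : List (String × String × String)) (filament_type : String) (filament_name : String) : Option String :=
  let ft_upper := PySem.Str.upper filament_type
  let name_lower := PySem.Str.lower filament_name
  pvALoop ft_upper name_lower generics none

-- ===== PORT B =====
-- helper _suffix_of from Source B
def pvSuffixOf (gen_name pre : String) : String :=
  if PySem.Str.startswith gen_name pre
  then PySem.Str.strip (PySem.Str.slice gen_name (some (PySem.Str.len pre)) none)
  else ""

def resolve_generic_id_alt (generics : List (String × String × String)) (filament_type : String) (filament_name : String) : Option String :=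
  let ft_upper := PySem.Str.upper filament_type
  let name_lower := PySem.Str.lower filament_name
  let pre := "generic " ++ PySem.Str.lower ft_upper
  let matching := (generics.filter (fun p => p.2.1 == ft_upper)).map (fun p => (p.1, p.2.2))
  match matching.find? (fun p => pvSuffixOf p.1 pre ≠ "" && PySem.Str.isIn (pvSuffixOf p.1 pre) name_lower) with
  | some p => some p.2
  | none =>
    match matching.reverse.find? (fun p => pvSuffixOf p.1 pre == "") with
    | some p => some p.2
    | none => none

-- ===== PRECONDITION & SPEC =====
def Spec_resolve_generic_id (generics : List (String × String × String)) (filament_type : String) (filament_name : String) (out : Option String) : Prop := out = resolve_generic_id_alt generics filament_type filament_name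
instance (generics : List (String × String × String)) (filament_type : String) (filament_name : String) (out : Option String) : Decidable (Spec_resolve_generic_id generics filament_type filament_name out) := by unfold Spec_resolve_generic_id; infer_instance

-- ===== CLAIM (what is proved, stated in full; the proofs are below) =====
def Claim_equal_resolve_generic_id : Prop := ∀ (generics : List (String × String × String)) (filament_type : String) (filament_name : String), Dom_resolve_generic_id generics filament_type filament_name → Spec_resolve_generic_id generics filament_type filament_name (resolve_generic_id generics filament_type filament_name)

-- ===== LEMMAS AND PROOFS =====

-- B's phases, as a function of the already-filtered matching list and an explicit fallback.
def pvBPhases (pre name_lower : String) (matching : List (String × String)) (fb : Option String) : Option String :=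
  match matching.find? (fun p => pvSuffixOf p.1 pre ≠ "" && PySem.Str.isIn (pvSuffixOf p.1 pre) name_lower) with
  | some p => some p.2
  | none =>
    match matching.reverse.find? (fun p => pvSuffixOf p.1 pre == "") with
    | some p => some p.2
    | none => fb

lemma pvBPhases_cons_hit (pre name_lower gn fid : String) (m : List (String × String)) (fb : Option String)
    (hs : pvSuffixOf gn pre ≠ "") (hin : PySem.Str.isIn (pvSuffixOf gn pre) name_lower = true) :
    pvBPhases pre name_lower ((gn, fid) :: m) fb = some fid := by
  have h : (decide (pvSuffixOf gn pre ≠ "") && PySem.Str.isIn (pvSuffixOf gn pre) name_lower) = true := by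
    simp only [PySem.Str.isIn_eq] at hin; simp [hs, hin]
  simp only [pvBPhases, List.find?_cons, h]

lemma pvBPhases_cons_miss (pre name_lower gn fid : String) (m : List (String × String)) (fb : Option String)
    (hs : pvSuffixOf gn pre ≠ "") (hin : ¬ PySem.Str.isIn (pvSuffixOf gn pre) name_lower = true) :
    pvBPhases pre name_lower ((gn, fid) :: m) fb = pvBPhases pre name_lower m fb := by
  simp only [Bool.not_eq_true] at hin
  simp only [pvBPhases, List.find?_cons, List.reverse_cons, List.find?_append, hs, hin,
    decide_true, not_false_eq_true, Bool.and_false]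
  have hempty : (pvSuffixOf gn pre == "") = false := by simp [hs]
  cases h1 : m.find? (fun p => pvSuffixOf p.1 pre ≠ "" && PySem.Str.isIn (pvSuffixOf p.1 pre) name_lower) with
  | some p => rfl
  | none =>
    cases h2 : m.reverse.find? (fun p => pvSuffixOf p.1 pre == "") <;>
      simp [h2, List.find?_cons, hempty]

lemma pvBPhases_cons_empty (pre name_lower gn fid : String) (m : List (String × String)) (fb : Option String)
    (hs : pvSuffixOf gn pre = "") :
    pvBPhases pre name_lower ((gn, fid) :: m) fb = pvBPhases pre name_lower m (some fid) := by
  simp only [pvBPhases, List.find?_cons, List.reverse_cons, List.find?_append, hs,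
    decide_false, Bool.not_false, ne_eq, not_true_eq_false, Bool.false_and]
  cases h1 : m.find? (fun p => pvSuffixOf p.1 pre ≠ "" && PySem.Str.isIn (pvSuffixOf p.1 pre) name_lower) with
  | some p => rfl
  | none =>
    cases h2 : m.reverse.find? (fun p => pvSuffixOf p.1 pre == "") <;>
      simp [h2, List.find?_cons, hs]

lemma pvALoop_eq_phases (ft_upper name_lower : String) (gs : List (String × String × String)) (fb : Option String) :
    pvALoop ft_upper name_lower gs fb =
      pvBPhases ("generic " ++ PySem.Str.lower ft_upper) name_lower
        ((gs.filter (fun p => p.2.1 == ft_upper)).map (fun p => (p.1, p.2.2))) fb := by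
  induction gs generalizing fb with
  | nil => simp [pvALoop, pvBPhases]
  | cons hd tl ih =>
    obtain ⟨gen_name, gen_ft, gen_fid⟩ := hd
    by_cases hft : gen_ft = ft_upper
    · subst hft
      rw [show (((gen_name, gen_ft, gen_fid) :: tl).filter (fun p => p.2.1 == gen_ft)).map
            (fun p => (p.1, p.2.2))
          = (gen_name, gen_fid) :: (tl.filter (fun p => p.2.1 == gen_ft)).map (fun p => (p.1, p.2.2)) by
        simp [List.filter_cons]]
      by_cases hs : pvSuffixOf gen_name ("generic " ++ PySem.Str.lower gen_ft) = ""
      · rw [show pvALoop gen_ft name_lower ((gen_name, gen_ft, gen_fid) :: tl) fb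
              = pvALoop gen_ft name_lower tl (some gen_fid) by
            simp [pvALoop, pvSuffixOf] at hs ⊢; split_ifs at hs ⊢ <;> simp_all]
        rw [ih, pvBPhases_cons_empty _ _ _ _ _ _ hs]
      · by_cases hin : PySem.Str.isIn (pvSuffixOf gen_name ("generic " ++ PySem.Str.lower gen_ft)) name_lower = true
        · rw [show pvALoop gen_ft name_lower ((gen_name, gen_ft, gen_fid) :: tl) fb = some gen_fid by
              simp [pvALoop, pvSuffixOf] at hs hin ⊢; split_ifs at hs ⊢ <;> simp_all]
          rw [pvBPhases_cons_hit _ _ _ _ _ _ hs hin]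
        · rw [show pvALoop gen_ft name_lower ((gen_name, gen_ft, gen_fid) :: tl) fb
                = pvALoop gen_ft name_lower tl fb by
              simp [pvALoop, pvSuffixOf] at hs hin ⊢; split_ifs at hs ⊢ <;> simp_all]
          rw [ih, pvBPhases_cons_miss _ _ _ _ _ _ hs hin]
    · rw [show pvALoop ft_upper name_lower ((gen_name, gen_ft, gen_fid) :: tl) fb
            = pvALoop ft_upper name_lower tl fb by simp [pvALoop, hft]]
      rw [ih]
      simp [List.filter_cons, hft]

-- ===== VERDICT (by name: the statement is the Claim_ definition above) =====
theorem resolve_generic_id_spec : Claim_equal_resolve_generic_id := by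
  intro generics filament_type filament_name _
  unfold Spec_resolve_generic_id resolve_generic_id resolve_generic_id_alt
  rw [pvALoop_eq_phases]
  rfl
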